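-- pv_equiv track=rewrite | github.com/wwt17/Zorro | scripts/make_sentences.py | paired
-- ===== SOURCE A (Python) =====
-- def paired(a, n=2):
--     a = iter(a)
--     while True:
--         p = []
--         try:
--             for i in range(n):
--                 p.append(next(a))
--             yield tuple(p)
--         except StopIteration:
--             break
-- ===== SOURCE B (Python) =====
-- def paired(a, n=2):
--     b = list(a)
--     m = len(b) - len(b) % n
--     for i in range(0, m, n):
--         yield tuple(b[i:i+n])
-- ===== Notes on version B (the rewrite author's own statement) =====
-- stated objective: simpler
-- what changed: B materialises the input once, computes the largest multiple of n of its length, and yields chunks by index slicing over range(0, m, n) instead of consuming an iterator item by item under next()/StopIteration and while-True/break.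
import Mathlib
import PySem

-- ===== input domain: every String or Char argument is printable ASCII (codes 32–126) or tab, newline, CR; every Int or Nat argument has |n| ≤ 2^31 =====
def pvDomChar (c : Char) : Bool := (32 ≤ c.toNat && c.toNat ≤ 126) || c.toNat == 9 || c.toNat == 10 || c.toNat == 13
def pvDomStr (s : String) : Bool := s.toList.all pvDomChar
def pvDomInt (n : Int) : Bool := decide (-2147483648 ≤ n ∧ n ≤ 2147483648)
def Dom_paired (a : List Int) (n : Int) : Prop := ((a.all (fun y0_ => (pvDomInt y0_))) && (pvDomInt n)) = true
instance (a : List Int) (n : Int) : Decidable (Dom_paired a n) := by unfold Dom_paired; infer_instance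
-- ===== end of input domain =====

-- B materialises the input once and yields chunks by index slicing over range(0, m, n) (m = largest
-- multiple of n ≤ len) instead of per-item next()/StopIteration under while-True/break (simpler, same cost).
-- Pre_ excludes n ≤ 0, on which Python A never returns (it loops forever yielding empty tuples).


-- ===== PORT A =====
-- the inner 'for i in range(n): p.append(next(a))': take items one at a time; none = StopIteration
def pvTakeN : Nat → List Int → Option (List Int × List Int)
  | 0, rest => some ([], rest)
  | _+1, [] => none
  | k+1, x :: rest =>
    match pvTakeN k rest with
    | none => none
    | some (p, r) => some (x :: p, r)

theorem pvTakeN_some_length (k : Nat) (a : List Int) (p r : List Int)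
    (h : pvTakeN (k+1) a = some (p, r)) : r.length < a.length := by
  induction k generalizing a p r with
  | zero =>
    cases a with
    | nil => simp [pvTakeN] at h
    | cons x rest => simp [pvTakeN] at h; simp [← h.2]
  | succ k ih =>
    cases a with
    | nil => simp [pvTakeN] at h
    | cons x rest =>
      simp only [pvTakeN] at h
      cases hr : pvTakeN (k+1) rest with
      | none => rw [hr] at h; simp at h
      | some pr =>
        rw [hr] at h
        simp at h
        have := ih rest pr.1 pr.2 (by rw [hr])
        simp [← h.2]
        omega

-- the outer 'while True' loop; chunk size is m+1 (n ≥ 1 inside Pre_)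
def pairedLoop (m : Nat) (a : List Int) : List (List Int) :=
  match h : pvTakeN (m+1) a with
  | none => []
  | some (p, r) => p :: pairedLoop m r
termination_by a.length
decreasing_by exact pvTakeN_some_length m a p r h

def paired (a : List Int) (n : Int) : List (List Int) :=
  if n ≤ 0 then [] else pairedLoop (n.toNat - 1) a    -- n ≤ 0: Python diverges; outside Pre_

-- ===== PORT B =====
-- b = list(a); m = len(b) - len(b) % n; for i in range(0, m, n): yield tuple(b[i:i+n])
-- (at n = 0 Python B raises ZeroDivisionError — outside Pre_; here pyRange with step 0 is [])
def paired_alt (a : List Int) (n : Int) : List (List Int) :=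
  let L : Int := a.length
  let m : Int := L - PySem.Int.mod L n
  (PySem.List.pyRange 0 m n).map (fun i => PySem.List.slice a (some i) (some (i + n)))

-- ===== PRECONDITION & SPEC =====
-- Pre_ excludes n ≤ 0: there Python A never returns (infinite generator of empty tuples).
def Pre_paired (a : List Int) (n : Int) : Prop := 1 ≤ n
instance (a : List Int) (n : Int) : Decidable (Pre_paired a n) := by unfold Pre_paired; infer_instance
def pvWitness_paired : List Int × Int := ([1, 2, 3, 4, 5], 2)

def Spec_paired (a : List Int) (n : Int) (out : List (List Int)) : Prop := out = paired_alt a n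
instance (a : List Int) (n : Int) (out : List (List Int)) : Decidable (Spec_paired a n out) := by unfold Spec_paired; infer_instance

-- ===== CLAIM (what is proved, stated in full; the proofs are below) =====
def Claim_equal_paired : Prop := ∀ (a : List Int) (n : Int), Dom_paired a n → Pre_paired a n → Spec_paired a n (paired a n)

-- ===== LEMMAS AND PROOFS =====
-- common closed form: the first (len / s) chunks of size s
def pvChunks (s : Nat) (a : List Int) : List (List Int) :=
  (List.range (a.length / s)).map (fun k => (a.drop (s * k)).take s)

theorem pvTakeN_eq (k : Nat) (a : List Int) :
    pvTakeN k a = if a.length < k then none else some (a.take k, a.drop k) := by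
  induction k generalizing a with
  | zero => simp [pvTakeN]
  | succ k ih =>
    cases a with
    | nil => simp [pvTakeN]
    | cons x rest =>
      simp only [pvTakeN, ih rest, List.length_cons]
      by_cases h : rest.length < k
      · simp [h]
      · simp [h]

theorem pairedLoop_eq_chunks (m : Nat) (a : List Int) :
    pairedLoop m a = pvChunks (m+1) a := by
  suffices h : ∀ len (a : List Int), a.length ≤ len → pairedLoop m a = pvChunks (m+1) a from
    h a.length a le_rfl
  intro len
  induction len with
  | zero =>
    intro a hlen
    have ha : a = [] := by cases a <;> simp_all
    subst ha
    rw [pairedLoop]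
    split
    · simp [pvChunks]
    · rename_i p r hsome
      rw [pvTakeN_eq] at hsome
      simp at hsome
  | succ len ih =>
    intro a hlen
    rw [pairedLoop]
    split
    · rename_i hnone
      rw [pvTakeN_eq] at hnone
      have hlt : a.length < m + 1 := by by_contra hc; simp [hc] at hnone
      have : a.length / (m+1) = 0 := Nat.div_eq_of_lt hlt
      simp [pvChunks, this]
    · rename_i p r hsome
      rw [pvTakeN_eq] at hsome
      have hge : ¬ a.length < m + 1 := by by_contra hc; simp [hc] at hsome
      rw [if_neg hge] at hsome
      simp only [Option.some.injEq, Prod.mk.injEq] at hsome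
      rw [← hsome.1, ← hsome.2]
      rw [ih (a.drop (m+1)) (by simp; omega)]
      unfold pvChunks
      have hq : a.length / (m+1) = (a.drop (m+1)).length / (m+1) + 1 := by
        simp only [List.length_drop]
        have hlen' : a.length = (a.length - (m+1)) + (m+1) := by omega
        conv_lhs => rw [hlen']
        rw [Nat.add_div_right _ (Nat.succ_pos m)]
      rw [hq, List.range_succ_eq_map]
      simp only [List.map_cons, List.map_map, Nat.mul_zero, List.drop_zero]
      congr 1
      apply List.map_congr_left
      intro k _
      simp only [Function.comp_apply, List.drop_drop]
      congr 2
      simp only [Nat.succ_eq_add_one]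
      ring

theorem paired_alt_eq_chunks (a : List Int) (n : Int) (hn : 1 ≤ n) :
    paired_alt a n = pvChunks n.toNat a := by
  have hn0 : (0:Int) < n := by omega
  set q : Nat := a.length / n.toNat with hq
  have hm : ((a.length : Int)) - PySem.Int.mod (a.length : Int) n = n * q := by
    have hmod : PySem.Int.mod (a.length : Int) n = (a.length : Int) % n := by
      simp [PySem.Int.mod, Int.fmod_eq_emod, Or.inl (le_of_lt hn0)]
    have h2 := Int.emod_add_ediv (a.length : Int) n
    have h3 : ((q : Nat) : Int) = (a.length : Int) / n := by
      rw [hq, Int.natCast_div]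
      congr 1
      omega
    rw [hmod, h3]
    omega
  show (PySem.List.pyRange 0 ((a.length : Int) - PySem.Int.mod (a.length : Int) n) n).map
      (fun i => PySem.List.slice a (some i) (some (i + n))) = pvChunks n.toNat a
  rw [hm, PySem.List.pyRange_of_pos 0 (n * q) hn0]
  have hcount : (if (0:Int) < n * q then ((n * q - 0 + n - 1) / n).toNat else 0) = q := by
    by_cases hq0 : q = 0
    · simp [hq0]
    · have hqpos : (0:Int) < n * q := by
        have : (0:Int) < (q:Int) := by exact_mod_cast Nat.pos_of_ne_zero hq0
        positivity
      rw [if_pos hqpos]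
      have hdiv : (n * (q:Int) - 0 + n - 1) / n = q := by
        have he : n * (q:Int) - 0 + n - 1 = (n - 1) + n * q := by ring
        rw [he, Int.add_mul_ediv_left _ _ (by omega : n ≠ 0),
          Int.ediv_eq_zero_of_lt (by omega) (by omega)]
        omega
      rw [hdiv]
      simp
  rw [hcount]
  unfold pvChunks
  rw [List.map_map, ← hq]
  apply List.map_congr_left
  intro k _
  simp only [Function.comp_apply]
  have hnc : ((n.toNat : Nat) : Int) = n := Int.toNat_of_nonneg (le_of_lt hn0)
  have h1 : (0:Int) + n * k = ((n.toNat * k : Nat) : Int) := by push_cast [hnc]; ring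
  rw [h1, PySem.List.slice_toNat a (by omega) (by omega)]
  have e2 : (((n.toNat * k : Nat) : Int) + n).toNat = n.toNat * k + n.toNat := by omega
  rw [Int.toNat_natCast, e2]
  congr 1
  omega

-- ===== VERDICT (by name: the statement is the Claim_ definition above) =====
theorem paired_spec : Claim_equal_paired := by
  intro a n _ hpre
  unfold Spec_paired paired
  have hn1 : (1:Int) ≤ n := hpre
  have hn : ¬ n ≤ 0 := by omega
  rw [if_neg hn, paired_alt_eq_chunks a n hn1, pairedLoop_eq_chunks]
  congr 1
  omega
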